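-- pv_equiv track=rewrite | github.com/FoXDev-404/resume_module | app/services/rewrite_service.py | _identify_added_keywords
-- ===== SOURCE A (Python) =====
-- from typing import List, Dict
--
-- def _identify_added_keywords(
--
--     original: str,
--     rewritten: str,
--     keywords: List[str]
-- ) -> List[str]:
--     """
--     Identify which keywords were added in the rewrite.
--
--     Args:
--         original: Original bullet text
--         rewritten: Rewritten bullet text
--         keywords: List of candidate keywords
--
--     Returns:
--         List of keywords that were added
--     """
--     original_lower = original.lower()
--     rewritten_lower = rewritten.lower()
--
--     added = []
--
--     for keyword in keywords:
--         keyword_lower = keyword.lower()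
--
--         # Check if keyword is in rewritten but not in original
--         if keyword_lower in rewritten_lower and keyword_lower not in original_lower:
--             added.append(keyword)
--
--     return added
-- ===== SOURCE B (Python) =====
-- def _identify_added_keywords(original, rewritten, keywords):
--     """One pass per text: index the lowercased patterns by their first four
--     characters (the few patterns shorter than that are tested directly), walk
--     the text once and test only the patterns indexed under the current window."""
--     patterns = {k.lower() for k in keywords}
--     shorts = {p for p in patterns if 0 < len(p) <= 3}
--     buckets = {}
--     for p in patterns:
--         if len(p) > 3:
--             buckets.setdefault(p[:4], []).append(p)
--
--     def found_in(text):
--         t = text.lower()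
--         found = {p for p in patterns if not p}
--         for p in shorts:
--             if p in t:
--                 found.add(p)
--         get = buckets.get
--         for i in range(len(t)):
--             for p in get(t[i:i + 4], ()):
--                 if p not in found and t.startswith(p, i):
--                     found.add(p)
--         return found
--
--     in_rewritten = found_in(rewritten)
--     in_original = found_in(original)
--     return [k for k in keywords
--             if k.lower() in in_rewritten and k.lower() not in in_original]
-- ===== Notes on version B (the rewrite author's own statement) =====
-- stated objective: faster
-- what changed: B replaces A's keyword-driven loop (one builtin substring search of each text per keyword) by a multi-pattern scan: it deduplicates the lowercased patterns, indexes them by their first four characters (shorter patterns are tested directly), walks each text once testing only the patterns indexed under the current window, and filters the keyword list against the two collected sets.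
import Mathlib
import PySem

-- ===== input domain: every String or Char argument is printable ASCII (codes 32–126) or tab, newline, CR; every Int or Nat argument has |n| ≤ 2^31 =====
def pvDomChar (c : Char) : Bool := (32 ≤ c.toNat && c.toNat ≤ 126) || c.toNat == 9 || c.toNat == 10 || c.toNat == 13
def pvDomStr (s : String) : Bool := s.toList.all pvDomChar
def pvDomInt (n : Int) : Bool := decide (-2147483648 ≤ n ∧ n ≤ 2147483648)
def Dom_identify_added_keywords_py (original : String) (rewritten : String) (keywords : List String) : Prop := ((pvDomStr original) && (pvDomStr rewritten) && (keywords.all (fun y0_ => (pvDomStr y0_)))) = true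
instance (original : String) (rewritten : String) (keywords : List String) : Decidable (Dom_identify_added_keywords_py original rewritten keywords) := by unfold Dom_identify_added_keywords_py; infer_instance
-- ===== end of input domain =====

-- B replaces A's keyword-driven loop (one builtin substring search per keyword and text) by a
-- multi-pattern scan: patterns deduplicated and indexed by their first four characters, one pass
-- over each text testing only the patterns indexed under the current window (alternative algorithm).

-- ===== PORT A =====
def identify_added_keywords_py (original : String) (rewritten : String) (keywords : List String) : List String :=
  let original_lower := PySem.Str.lower original
  let rewritten_lower := PySem.Str.lower rewritten
  keywords.foldl (fun added keyword =>
    let keyword_lower := PySem.Str.lower keyword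
    if PySem.Str.isIn keyword_lower rewritten_lower && !(PySem.Str.isIn keyword_lower original_lower) then
      added ++ [keyword]
    else added) []

-- ===== PORT B =====
-- Source B's shorts: the patterns of length 1 to 3, as a set
def pvShorts (patterns : PySem.Set String) : PySem.Set String :=
  patterns.filter (fun p => 0 < p.toList.length && p.toList.length ≤ 3)

-- Source B's bucket-building loop: longer patterns grouped by their first four characters
-- (p[:4] is exact as p.toList.take 4; buckets.setdefault(key, []).append(p) is Dict.modify key [] (· ++ [p]))
def pvBuckets (patterns : PySem.Set String) : PySem.Dict (List Char) (List String) :=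
  patterns.foldl (fun d p =>
    if 3 < p.toList.length then d.modify (p.toList.take 4) [] (· ++ [p]) else d)
    PySem.Dict.empty

-- inner loop of found_in over one bucket at position i
def pvStep (t : List Char) (bucket : List String) (found : PySem.Set String) (i : Nat) : PySem.Set String :=
  bucket.foldl (fun found p =>
    if !(PySem.Set.contains found p) && PySem.Chars.startswith (t.drop i) p.toList then
      PySem.Set.add found p
    else found) found

-- Source B's found_in: the direct test of the short patterns ('p in t'), then one pass over the
-- positions (range(len(t))), looking up the bucket of t[i:i+4] (exact as (t.drop i).take 4);
-- the start is the set of empty patterns (they occur in every text)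
def pvFoundIn (text : String) (patterns : PySem.Set String) (shorts : PySem.Set String)
    (buckets : PySem.Dict (List Char) (List String)) : PySem.Set String :=
  let t := (PySem.Str.lower text).toList
  let found := (patterns.filter (fun p => p.toList.isEmpty))
  let found := shorts.foldl (fun found p =>
    if PySem.Chars.isIn p.toList t then PySem.Set.add found p else found) found
  (List.range t.length).foldl (fun found i =>
    pvStep t (PySem.Dict.getD buckets ((t.drop i).take 4) []) found i) found

def identify_added_keywords_py_alt (original : String) (rewritten : String) (keywords : List String) : List String :=
  let patterns := PySem.Set.ofList (keywords.map PySem.Str.lower)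
  let shorts := pvShorts patterns
  let buckets := pvBuckets patterns
  let in_rewritten := pvFoundIn rewritten patterns shorts buckets
  let in_original := pvFoundIn original patterns shorts buckets
  keywords.filter (fun k =>
    PySem.Set.contains in_rewritten (PySem.Str.lower k) &&
    !(PySem.Set.contains in_original (PySem.Str.lower k)))

-- ===== PRECONDITION & SPEC =====
def Spec_identify_added_keywords_py (original : String) (rewritten : String) (keywords : List String) (out : List String) : Prop := out = identify_added_keywords_py_alt original rewritten keywords
instance (original : String) (rewritten : String) (keywords : List String) (out : List String) : Decidable (Spec_identify_added_keywords_py original rewritten keywords out) := by unfold Spec_identify_added_keywords_py; infer_instance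

-- ===== CLAIM (what is proved, stated in full; the proofs are below) =====
def Claim_equal_identify_added_keywords_py : Prop := ∀ (original : String) (rewritten : String) (keywords : List String), Dom_identify_added_keywords_py original rewritten keywords → Spec_identify_added_keywords_py original rewritten keywords (identify_added_keywords_py original rewritten keywords)

-- ===== LEMMAS AND PROOFS =====

-- the bucket of a key holds exactly the processed longer patterns whose first four characters are the key
theorem pv_buckets_getD (l : List String) (d : PySem.Dict (List Char) (List String)) (key : List Char) :
    PySem.Dict.getD (l.foldl (fun d p =>
        if 3 < p.toList.length then d.modify (p.toList.take 4) [] (· ++ [p]) else d) d) key []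
      = PySem.Dict.getD d key []
          ++ l.filter (fun p => decide (3 < p.toList.length) && (p.toList.take 4 == key)) := by
  induction l generalizing d with
  | nil => simp
  | cons p ps ih =>
    rw [List.foldl_cons]
    by_cases hp : 3 < p.toList.length
    · rw [if_pos hp, ih, PySem.Dict.getD_modify]
      by_cases hk : key = p.toList.take 4
      · subst hk; simp_all
      · simp_all [Ne.symm hk]
    · rw [if_neg hp, ih]
      simp_all

-- membership in a bucket of pvBuckets
theorem pv_mem_buckets (pats : List String) (key : List Char) (q : String) :
    q ∈ PySem.Dict.getD (pvBuckets pats) key []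
      ↔ q ∈ pats ∧ 3 < q.toList.length ∧ q.toList.take 4 = key := by
  unfold pvBuckets
  rw [pv_buckets_getD]
  simp

-- the direct pass over the short patterns: q ends up collected iff it was already,
-- or it is a short pattern occurring in t
theorem pv_shorts_contains (t : List Char) (l : List String) (found : List String) (q : String) :
    PySem.Set.contains (l.foldl (fun found p =>
        if PySem.Chars.isIn p.toList t then PySem.Set.add found p else found) found) q
      = (PySem.Set.contains found q
          || (PySem.Set.contains l q && PySem.Chars.isIn q.toList t)) := by
  induction l generalizing found with
  | nil => simp
  | cons p ps ih =>
    rw [List.foldl_cons]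
    cases hin : PySem.Chars.isIn p.toList t with
    | true =>
      rw [if_pos rfl, ih]
      by_cases hpq : p = q
      · subst hpq
        have hmem : p ∈ PySem.Set.add found p := by simp [PySem.Set.mem_add]
        simp [hmem, hin]
      · have : (q ∈ PySem.Set.add found p) ↔ q ∈ found := by
          simp [PySem.Set.mem_add, Ne.symm hpq]
        simp [this, Ne.symm hpq]
    | false =>
      rw [if_neg (by simp), ih]
      by_cases hpq : p = q
      · subst hpq; simp [hin]
      · simp [Ne.symm hpq]

-- one bucket pass: q ends up collected iff it was already, or it is in the bucket and starts at i
theorem pv_step_contains (t : List Char) (bucket : List String) (i : Nat) (found : List String) (q : String) :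
    PySem.Set.contains (pvStep t bucket found i) q
      = (PySem.Set.contains found q
          || (PySem.Set.contains bucket q && PySem.Chars.startswith (t.drop i) q.toList)) := by
  unfold pvStep
  induction bucket generalizing found with
  | nil => simp
  | cons p ps ih =>
    rw [List.foldl_cons]
    by_cases hf : p ∈ found
    · rw [if_neg (by simp [hf]), ih]
      by_cases hpq : p = q
      · subst hpq; simp [hf]
      · simp [Ne.symm hpq]
    · cases hs : PySem.Chars.startswith (t.drop i) p.toList with
      | true =>
        rw [if_pos (by simp [hf]),
           show PySem.Set.add found p = found ++ [p] from PySem.Set.add_of_not_mem hf, ih]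
        by_cases hpq : p = q
        · subst hpq; simp_all
        · simp [Ne.symm hpq]
      | false =>
        rw [if_neg (by simp), ih]
        by_cases hpq : p = q
        · subst hpq; simp_all
        · simp [Ne.symm hpq]

-- the scan over a list of positions
theorem pv_scan_contains (t : List Char) (buckets : PySem.Dict (List Char) (List String))
    (is : List Nat) (found : List String) (q : String) :
    PySem.Set.contains (is.foldl (fun found i =>
        pvStep t (PySem.Dict.getD buckets ((t.drop i).take 4) []) found i) found) q
      = (PySem.Set.contains found q
          || is.any (fun i =>
              PySem.Set.contains (PySem.Dict.getD buckets ((t.drop i).take 4) []) q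
                && PySem.Chars.startswith (t.drop i) q.toList)) := by
  induction is generalizing found with
  | nil => simp
  | cons i is ih =>
    rw [List.foldl_cons, ih, pv_step_contains]
    cases h1 : PySem.Set.contains found q <;> simp_all

-- the whole scan: q is collected iff it is a pattern occurring somewhere in the (lowered) text
theorem pv_foundIn_contains (text : String) (pats : List String) (q : String) :
    PySem.Set.contains (pvFoundIn text pats (pvShorts pats) (pvBuckets pats)) q
      = (PySem.Set.contains pats q && PySem.Str.isIn q (PySem.Str.lower text)) := by
  simp only [pvFoundIn]
  rw [pv_scan_contains, pv_shorts_contains]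
  set t := (PySem.Str.lower text).toList with ht
  have hstr : PySem.Str.isIn q (PySem.Str.lower text) = PySem.Chars.isIn q.toList t := by
    rw [PySem.Str.isIn_eq, ← ht]
  rw [hstr]
  obtain ⟨L, hsplit⟩ : ∃ L, q.toList = L := ⟨_, rfl⟩
  rcases L with _ | ⟨c1, _ | ⟨c2, _ | ⟨c3, _ | ⟨c4, rest⟩⟩⟩⟩
  · -- empty pattern: collected from the start, and it occurs in every text
    have hnb : ∀ key, q ∉ PySem.Dict.getD (pvBuckets pats) key [] := by
      intro key
      rw [pv_mem_buckets]
      rintro ⟨_, hlen, _⟩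
      rw [hsplit] at hlen
      simp at hlen
    have hnsh : q ∉ pvShorts pats := by
      intro hmem
      have := (List.mem_filter.mp hmem).2
      rw [hsplit] at this
      simp at this
    have hin : PySem.Chars.isIn q.toList t = true := by
      rw [hsplit]; exact PySem.Chars.isIn_nil t
    rw [hin]
    simp [hnb, hnsh, List.mem_filter, hsplit]
  · -- length-1 pattern: collected via the direct short-pattern pass
    have hnb : ∀ key, q ∉ PySem.Dict.getD (pvBuckets pats) key [] := by
      intro key
      rw [pv_mem_buckets]
      rintro ⟨_, hlen, _⟩
      rw [hsplit] at hlen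
      simp at hlen
    have hsh : PySem.Set.contains (pvShorts pats) q = PySem.Set.contains pats q := by
      unfold pvShorts
      have hql : q.length = 1 := by simpa using congrArg List.length hsplit
      simp [List.mem_filter, hql]
    have hfl : PySem.Set.contains (pats.filter (fun p => p.toList.isEmpty)) q = false := by
      simp [List.mem_filter, hsplit]
    rw [hsh, hfl]
    have hany : ((List.range t.length).any (fun i =>
        PySem.Set.contains (PySem.Dict.getD (pvBuckets pats) ((t.drop i).take 4) []) q
          && PySem.Chars.startswith (t.drop i) q.toList)) = false := by
      rw [List.any_eq_false]
      intro i _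
      simp [hnb]
    rw [hany]
    simp
  · -- length-2 pattern: collected via the direct short-pattern pass (length-3 below)
    have hnb : ∀ key, q ∉ PySem.Dict.getD (pvBuckets pats) key [] := by
      intro key
      rw [pv_mem_buckets]
      rintro ⟨_, hlen, _⟩
      rw [hsplit] at hlen
      simp at hlen
    have hsh : PySem.Set.contains (pvShorts pats) q = PySem.Set.contains pats q := by
      unfold pvShorts
      have hql : q.length = 2 := by simpa using congrArg List.length hsplit
      simp [List.mem_filter, hql]
    have hfl : PySem.Set.contains (pats.filter (fun p => p.toList.isEmpty)) q = false := by
      simp [List.mem_filter, hsplit]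
    rw [hsh, hfl]
    have hany : ((List.range t.length).any (fun i =>
        PySem.Set.contains (PySem.Dict.getD (pvBuckets pats) ((t.drop i).take 4) []) q
          && PySem.Chars.startswith (t.drop i) q.toList)) = false := by
      rw [List.any_eq_false]
      intro i _
      simp [hnb]
    rw [hany]
    simp
  · -- length-3 pattern: collected via the direct short-pattern pass
    have hnb : ∀ key, q ∉ PySem.Dict.getD (pvBuckets pats) key [] := by
      intro key
      rw [pv_mem_buckets]
      rintro ⟨_, hlen, _⟩
      rw [hsplit] at hlen
      simp at hlen
    have hsh : PySem.Set.contains (pvShorts pats) q = PySem.Set.contains pats q := by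
      unfold pvShorts
      have hql : q.length = 3 := by simpa using congrArg List.length hsplit
      simp [List.mem_filter, hql]
    have hfl : PySem.Set.contains (pats.filter (fun p => p.toList.isEmpty)) q = false := by
      simp [List.mem_filter, hsplit]
    rw [hsh, hfl]
    have hany : ((List.range t.length).any (fun i =>
        PySem.Set.contains (PySem.Dict.getD (pvBuckets pats) ((t.drop i).take 4) []) q
          && PySem.Chars.startswith (t.drop i) q.toList)) = false := by
      rw [List.any_eq_false]
      intro i _
      simp [hnb]
    rw [hany]
    simp
  · -- pattern of length ≥ 4: collected via its first-four-characters bucket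
    have hlen4 : 3 < q.toList.length := by rw [hsplit]; simp
    have hnsh : q ∉ pvShorts pats := by
      intro hmem
      have := (List.mem_filter.mp hmem).2
      rw [hsplit] at this
      simp at this
      omega
    have hfl : PySem.Set.contains (pats.filter (fun p => p.toList.isEmpty)) q = false := by
      simp [List.mem_filter, hsplit]
    rw [hfl]
    cases hp : PySem.Set.contains pats q with
    | false =>
      have hany : ((List.range t.length).any (fun i =>
          PySem.Set.contains (PySem.Dict.getD (pvBuckets pats) ((t.drop i).take 4) []) q
            && PySem.Chars.startswith (t.drop i) q.toList)) = false := by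
        rw [List.any_eq_false]
        intro i _
        have hnb : q ∉ PySem.Dict.getD (pvBuckets pats) ((t.drop i).take 4) [] := by
          rw [pv_mem_buckets]
          rintro ⟨hmem, _, _⟩
          simp [hmem] at hp
        simp [hnb]
      rw [hany]
      simp [hnsh]
    | true =>
      have hqpats : q ∈ pats := by simpa using hp
      cases hIn : PySem.Chars.isIn q.toList t with
      | true =>
        obtain ⟨j, hj⟩ := (PySem.Chars.exists_prefix_drop_iff_isIn q.toList t).mpr hIn
        have hlen' : q.length = rest.length + 4 := by
          simpa using congrArg List.length hsplit
        have hjlt : j < t.length := by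
          by_contra hge
          rw [List.drop_eq_nil_of_le (by omega), List.prefix_nil] at hj
          rw [hj] at hsplit
          simp at hsplit
        have htake : q.toList.take 4 = (t.drop j).take 4 := by
          have hpre : q.toList.take 4 <+: (t.drop j).take 4 := hj.take 4
          have hlq : (q.toList.take 4).length = 4 := by
            simp [List.length_take]; omega
          have hld : ((t.drop j).take 4).length = 4 := by
            have hle : q.length ≤ t.length - j := by simpa using hj.length_le
            simp only [List.length_take, List.length_drop]
            omega
          exact hpre.eq_of_length (by rw [hlq, hld])
        have hb : q ∈ PySem.Dict.getD (pvBuckets pats) ((t.drop j).take 4) [] :=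
          (pv_mem_buckets pats _ q).mpr ⟨hqpats, hlen4, htake⟩
        have hany : ((List.range t.length).any (fun i =>
            PySem.Set.contains (PySem.Dict.getD (pvBuckets pats) ((t.drop i).take 4) []) q
              && PySem.Chars.startswith (t.drop i) q.toList)) = true := by
          rw [List.any_eq_true]
          refine ⟨j, List.mem_range.mpr hjlt, ?_⟩
          simp [hb, (PySem.Chars.startswith_iff _ _).mpr hj]
        rw [hany]
        simp
      | false =>
        have hany : ((List.range t.length).any (fun i =>
            PySem.Set.contains (PySem.Dict.getD (pvBuckets pats) ((t.drop i).take 4) []) q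
              && PySem.Chars.startswith (t.drop i) q.toList)) = false := by
          rw [List.any_eq_false]
          intro i _
          have hns : PySem.Chars.startswith (t.drop i) q.toList = false := by
            cases hsw : PySem.Chars.startswith (t.drop i) q.toList with
            | false => rfl
            | true =>
              have : PySem.Chars.isIn q.toList t = true :=
                (PySem.Chars.exists_prefix_drop_iff_isIn q.toList t).mp
                  ⟨i, (PySem.Chars.startswith_iff _ _).mp hsw⟩
              simp [this] at hIn
          simp [hns]
        rw [hany]
        simp [hnsh]

theorem identify_added_keywords_py_spec : Claim_equal_identify_added_keywords_py := by
  intro original rewritten keywords _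
  unfold Spec_identify_added_keywords_py identify_added_keywords_py identify_added_keywords_py_alt
  rw [PySem.List.foldl_append_if]
  simp only [List.nil_append, List.map_id']
  apply List.filter_congr
  intro k hk
  rw [pv_foundIn_contains, pv_foundIn_contains]
  have hx : ∃ a ∈ keywords, PySem.Str.lower a = PySem.Str.lower k := ⟨k, hk, rfl⟩
  simp [hx]
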